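-- pv_equiv track=rewrite | github.com/AlexLagin/BP | bp_code.py | find_unreachable
-- ===== SOURCE A (Python) =====
-- def find_unreachable(grammar, start_symbol):
--     """
--     Zistí neterminály, ktoré nie sú dostupné zo štartovacieho symbolu.
--     """
--     if start_symbol not in grammar:
--         return set(grammar.keys())
--     reachable = {start_symbol}
--     queue = [start_symbol]
--     while queue:
--         cur = queue.pop()
--         for prod in grammar[cur]:
--             for nt in grammar.keys():
--                 if nt in prod and nt not in reachable:
--                     reachable.add(nt)
--                     queue.append(nt)
--     if "S'" in grammar:
--         reachable.add("S'")
--     return set(grammar.keys()) - reachable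
-- ===== SOURCE B (Python) =====
-- def find_unreachable(grammar, start_symbol):
--     """
--     Zistí neterminály, ktoré nie sú dostupné zo štartovacieho symbolu.
--     """
--     if start_symbol not in grammar:
--         return set(grammar.keys())
--     reachable = {start_symbol}
--     while True:
--         new = {nt for c in reachable for prod in grammar[c]
--                for nt in grammar if nt in prod and nt not in reachable}
--         if not new:
--             break
--         reachable |= new
--     if "S'" in grammar:
--         reachable.add("S'")
--     return set(grammar.keys()) - reachable
-- ===== Notes on version B (the rewrite author's own statement) =====
-- stated objective: alternative
-- what changed: A's explicit worklist (stack) traversal with in-place queue mutation is replaced by a round-based fixpoint iteration that recomputes the set of newly mentioned nonterminals from the whole reachable set and unions it in until nothing new appears.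
import Mathlib
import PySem

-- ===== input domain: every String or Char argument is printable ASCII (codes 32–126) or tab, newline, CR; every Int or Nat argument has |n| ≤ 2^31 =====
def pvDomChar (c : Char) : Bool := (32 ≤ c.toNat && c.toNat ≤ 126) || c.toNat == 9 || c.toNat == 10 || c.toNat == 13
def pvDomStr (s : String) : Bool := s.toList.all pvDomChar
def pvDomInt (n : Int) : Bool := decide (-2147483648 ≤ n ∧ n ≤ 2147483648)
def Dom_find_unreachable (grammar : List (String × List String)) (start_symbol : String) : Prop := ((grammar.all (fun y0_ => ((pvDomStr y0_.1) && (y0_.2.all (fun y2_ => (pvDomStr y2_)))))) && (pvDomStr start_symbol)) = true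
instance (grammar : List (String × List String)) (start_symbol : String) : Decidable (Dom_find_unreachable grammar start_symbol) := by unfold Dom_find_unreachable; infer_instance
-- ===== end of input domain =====

-- B replaces A's explicit worklist (stack) traversal by a round-based fixpoint iteration that
-- recomputes the frontier of newly mentioned nonterminals until nothing new appears (objective:
-- alternative; same return value).

-- Shared accessors for the dict argument (dict → assoc list; keys = first occurrences, lookup = first match).
def pvKeys (g : List (String × List String)) : List String :=
  PySem.Set.ofList (g.map (fun p => p.1))

def pvProds (g : List (String × List String)) (c : String) : List String :=
  match g.find? (fun p => p.1 == c) with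
  | some p => p.2
  | none => []

-- bridging contains/∈ (used by the termination proofs below)
lemma pv_not_mem_of_contains_false {l : List String} {x : String}
    (h : l.contains x = false) : x ∉ l := by
  intro hm
  have hq := List.contains_iff_mem.mpr hm
  rw [h] at hq
  exact Bool.noConfusion hq

lemma pv_contains_false_of_not_mem {l : List String} {x : String}
    (h : x ∉ l) : l.contains x = false := by
  cases hc : l.contains x
  · rfl
  · exact absurd (List.contains_iff_mem.mp hc) h

-- ===== PORT A =====
-- inner `for nt in grammar.keys(): if nt in prod and nt not in reachable: reachable.add(nt); queue.append(nt)`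
def faUpd (prod : String) (rq : List String × List String) (nt : String) :
    List String × List String :=
  if PySem.Str.isIn nt prod && !(rq.1.contains nt) then (rq.1 ++ [nt], rq.2 ++ [nt]) else rq

lemma faUpd_eq (prod : String) (rq : List String × List String) (nt : String) :
    faUpd prod rq nt =
      if PySem.Str.isIn nt prod && !(rq.1.contains nt) then (rq.1 ++ [nt], rq.2 ++ [nt])
      else rq := rfl

-- `for prod in grammar[cur]:` running the inner loop above; state = (reachable, queue)
def faBody (g : List (String × List String)) (keys : List String) (cur : String)
    (st : List String × List String) : List String × List String :=
  (pvProds g cur).foldl (fun st prod => keys.foldl (faUpd prod) st) st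

-- termination measure: number of keys not yet reachable (+ queue length for A's loop)
def pvLf (keys r : List String) : Nat := (keys.filter (fun k => !(r.contains k))).length

-- termination lemmas, cited by the ports' decreasing_by
lemma pv_filter_lt {p : String → Bool} {l : List String} {a : String}
    (h : a ∈ l) (hp : p a = false) : (l.filter p).length < l.length := by
  induction l with
  | nil => cases h
  | cons b t ih =>
    rcases List.mem_cons.mp h with rfl | hat
    · rw [List.filter_cons, if_neg (by simp [hp])]
      have := List.length_filter_le p t
      simp only [List.length_cons]
      omega
    · have := ih hat
      by_cases hb : p b = true
      · rw [List.filter_cons, if_pos hb]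
        simp only [List.length_cons]
        omega
      · rw [List.filter_cons, if_neg hb]
        simp only [List.length_cons]
        omega

lemma pvLf_filter_eq {keys r r' : List String} (h : ∀ k, k ∈ r → k ∈ r') :
    keys.filter (fun k => !(r'.contains k)) =
      (keys.filter (fun k => !(r.contains k))).filter (fun k => !(r'.contains k)) := by
  rw [List.filter_filter]
  apply List.filter_congr
  intro k _
  cases hc : r'.contains k
  · have hr : r.contains k = false := by
      cases hr : r.contains k
      · rfl
      · exact absurd (h k (List.contains_iff_mem.mp hr)) (pv_not_mem_of_contains_false hc)
    rw [hr]
    rfl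
  · rw [Bool.not_true, Bool.false_and]

lemma pvLf_lt {keys r r' : List String} (h : ∀ k, k ∈ r → k ∈ r') {nt : String}
    (h1 : nt ∈ keys) (h2 : nt ∉ r) (h3 : nt ∈ r') : pvLf keys r' < pvLf keys r := by
  unfold pvLf
  rw [pvLf_filter_eq h]
  apply pv_filter_lt (a := nt)
  · refine List.mem_filter.mpr ⟨h1, ?_⟩
    show (!(r.contains nt)) = true
    rw [pv_contains_false_of_not_mem h2]
    rfl
  · show (!(r'.contains nt)) = false
    rw [List.contains_iff_mem.mpr h3]
    rfl

lemma faUpd_mu {keys : List String} {prod nt : String} (hk : nt ∈ keys)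
    (st : List String × List String) :
    pvLf keys (faUpd prod st nt).1 + (faUpd prod st nt).2.length ≤
      pvLf keys st.1 + st.2.length := by
  rw [faUpd_eq]
  split
  · rename_i hcond
    have hnm : nt ∉ st.1 := by
      have h2 := ((Bool.and_eq_true ..).mp hcond).2
      exact pv_not_mem_of_contains_false (by simpa using h2)
    have hlt : pvLf keys (st.1 ++ [nt]) < pvLf keys st.1 :=
      pvLf_lt (fun k hm => List.mem_append_left _ hm) hk hnm
        (List.mem_append_right _ (by simp))
    simp only [List.length_append, List.length_cons, List.length_nil]
    omega
  · exact le_refl _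

lemma faStep_mu {keys : List String} {prod : String} :
    ∀ (l : List String), (∀ x ∈ l, x ∈ keys) → ∀ st : List String × List String,
      pvLf keys (l.foldl (faUpd prod) st).1 + (l.foldl (faUpd prod) st).2.length ≤
        pvLf keys st.1 + st.2.length := by
  intro l
  induction l with
  | nil => intro _ st; simp
  | cons nt t ih =>
    intro hsub st
    simp only [List.foldl_cons]
    exact le_trans (ih (fun x hx => hsub x (List.mem_cons_of_mem _ hx)) (faUpd prod st nt))
      (faUpd_mu (hsub nt List.mem_cons_self) st)

lemma faBody_mu (g : List (String × List String)) (keys : List String) (cur : String)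
    (st : List String × List String) :
    pvLf keys (faBody g keys cur st).1 + (faBody g keys cur st).2.length ≤
      pvLf keys st.1 + st.2.length := by
  unfold faBody
  generalize pvProds g cur = P
  induction P generalizing st with
  | nil => simp
  | cons p t ih =>
    simp only [List.foldl_cons]
    exact le_trans (ih _) (faStep_mu (keys := keys) keys (fun _ h => h) st)

-- `while queue: cur = queue.pop(); …`
def faLoop (g : List (String × List String)) (keys r q : List String) : List String :=
  if h : q = [] then r
  else
    let st := faBody g keys (q.getLast h) (r, q.dropLast)
    faLoop g keys st.1 st.2
termination_by pvLf keys r + q.length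
decreasing_by
  have hmu := faBody_mu g keys (q.getLast h) (r, q.dropLast)
  have hq : q.length ≠ 0 := by simpa using h
  simp only [List.length_dropLast] at hmu
  omega

def find_unreachable (grammar : List (String × List String)) (start_symbol : String) :
    List String :=
  if !((pvKeys grammar).contains start_symbol) then pvKeys grammar
  else
    PySem.Set.diff (pvKeys grammar)
      (if (pvKeys grammar).contains "S'"
       then PySem.Set.add (faLoop grammar (pvKeys grammar) [start_symbol] [start_symbol]) "S'"
       else faLoop grammar (pvKeys grammar) [start_symbol] [start_symbol])

-- ===== PORT B =====
-- `{nt … if nt in prod and nt not in reachable}`: innermost comprehension step (set-builder dedup)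
def fbUpd (r : List String) (prod : String) (acc : List String) (nt : String) : List String :=
  if PySem.Str.isIn nt prod && !(r.contains nt) then PySem.Set.add acc nt else acc

lemma fbUpd_eq (r : List String) (prod : String) (acc : List String) (nt : String) :
    fbUpd r prod acc nt =
      if PySem.Str.isIn nt prod && !(r.contains nt) then PySem.Set.add acc nt else acc := rfl

def fbProd (keys r : List String) (acc : List String) (prod : String) : List String :=
  keys.foldl (fbUpd r prod) acc

-- new = {nt for c in reachable for prod in grammar[c] for nt in grammar if nt in prod and nt not in reachable}
def fbNew (g : List (String × List String)) (keys r : List String) : List String :=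
  r.foldl (fun acc c => (pvProds g c).foldl (fbProd keys r) acc) []

-- soundness of the frontier, cited by fbLoop's decreasing_by
lemma fbProd_sound {r : List String} {prod x : String} :
    ∀ (l acc : List String), x ∈ l.foldl (fbUpd r prod) acc →
      x ∈ acc ∨ (x ∈ l ∧ x ∉ r ∧ PySem.Str.isIn x prod = true) := by
  intro l
  induction l with
  | nil => intro acc hx; exact Or.inl hx
  | cons nt t ih =>
    intro acc hx
    rcases ih _ hx with hacc | ⟨hxt, hxr, hxin⟩
    · rw [fbUpd_eq] at hacc
      split at hacc
      · rename_i hcond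
        rcases (PySem.Set.mem_add _ _ _).mp hacc with hacc | rfl
        · exact Or.inl hacc
        · refine Or.inr ⟨List.mem_cons_self, ?_, ((Bool.and_eq_true ..).mp hcond).1⟩
          have h2 := ((Bool.and_eq_true ..).mp hcond).2
          exact pv_not_mem_of_contains_false (by simpa using h2)
      · exact Or.inl hacc
    · exact Or.inr ⟨List.mem_cons_of_mem _ hxt, hxr, hxin⟩

lemma fbProdsFold_sound {keys r : List String} {x : String} :
    ∀ (P acc : List String), x ∈ P.foldl (fbProd keys r) acc →
      x ∈ acc ∨ (x ∈ keys ∧ x ∉ r ∧ ∃ prod ∈ P, PySem.Str.isIn x prod = true) := by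
  intro P
  induction P with
  | nil => intro acc hx; exact Or.inl hx
  | cons p t ih =>
    intro acc hx
    rcases ih _ hx with hacc | ⟨hk, hr, prod, hpt, hin⟩
    · rcases fbProd_sound _ _ hacc with hacc | ⟨hk, hr, hin⟩
      · exact Or.inl hacc
      · exact Or.inr ⟨hk, hr, p, List.mem_cons_self, hin⟩
    · exact Or.inr ⟨hk, hr, prod, List.mem_cons_of_mem _ hpt, hin⟩

lemma fbNewFold_sound {g : List (String × List String)} {keys r : List String} {x : String} :
    ∀ (L acc : List String),
      x ∈ L.foldl (fun acc c => (pvProds g c).foldl (fbProd keys r) acc) acc →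
      x ∈ acc ∨ (x ∈ keys ∧ x ∉ r ∧ ∃ c ∈ L, ∃ prod ∈ pvProds g c,
        PySem.Str.isIn x prod = true) := by
  intro L
  induction L with
  | nil => intro acc hx; exact Or.inl hx
  | cons c t ih =>
    intro acc hx
    rcases ih _ hx with hacc | ⟨hk, hr, c', hct, prod, hp, hin⟩
    · rcases fbProdsFold_sound _ _ hacc with hacc | ⟨hk, hr, prod, hp, hin⟩
      · exact Or.inl hacc
      · exact Or.inr ⟨hk, hr, c, List.mem_cons_self, prod, hp, hin⟩
    · exact Or.inr ⟨hk, hr, c', List.mem_cons_of_mem _ hct, prod, hp, hin⟩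

lemma fbNew_sound {g : List (String × List String)} {keys r : List String} {x : String}
    (hx : x ∈ fbNew g keys r) :
    x ∈ keys ∧ x ∉ r ∧ ∃ c ∈ r, ∃ prod ∈ pvProds g c, PySem.Str.isIn x prod = true := by
  rcases fbNewFold_sound r [] hx with h | h
  · cases h
  · exact h

-- `while True: new = …; if not new: break; reachable |= new`
def fbLoop (g : List (String × List String)) (keys r : List String) : List String :=
  let nw := fbNew g keys r
  if h : nw = [] then r
  else fbLoop g keys (PySem.Set.union r nw)
termination_by pvLf keys r
decreasing_by
  obtain ⟨x, hx⟩ := List.exists_mem_of_ne_nil _ h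
  obtain ⟨hk, hr, -⟩ := fbNew_sound hx
  exact pvLf_lt (fun k hm => (PySem.Set.mem_union _ _ _).mpr (Or.inl hm)) hk hr
    ((PySem.Set.mem_union _ _ _).mpr (Or.inr hx))

def find_unreachable_alt (grammar : List (String × List String)) (start_symbol : String) :
    List String :=
  if !((pvKeys grammar).contains start_symbol) then pvKeys grammar
  else
    PySem.Set.diff (pvKeys grammar)
      (if (pvKeys grammar).contains "S'"
       then PySem.Set.add (fbLoop grammar (pvKeys grammar) [start_symbol]) "S'"
       else fbLoop grammar (pvKeys grammar) [start_symbol])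

-- ===== PRECONDITION & SPEC =====
def Spec_find_unreachable (grammar : List (String × List String)) (start_symbol : String) (out : List String) : Prop := out = find_unreachable_alt grammar start_symbol
instance (grammar : List (String × List String)) (start_symbol : String) (out : List String) : Decidable (Spec_find_unreachable grammar start_symbol out) := by unfold Spec_find_unreachable; infer_instance

-- ===== CLAIM (what is proved, stated in full; the proofs are below) =====
def Claim_equal_find_unreachable : Prop := ∀ (grammar : List (String × List String)) (start_symbol : String), Dom_find_unreachable grammar start_symbol → Spec_find_unreachable grammar start_symbol (find_unreachable grammar start_symbol)

-- ===== LEMMAS AND PROOFS =====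

-- reachability closure both loops compute
inductive pvRch (g : List (String × List String)) (s : String) : String → Prop
  | base : pvRch g s s
  | step {c nt prod : String} : pvRch g s c → prod ∈ pvProds g c → nt ∈ pvKeys g →
      PySem.Str.isIn nt prod = true → pvRch g s nt

-- A-side fold lemmas
lemma faStep_mono1 {prod x : String} :
    ∀ (l : List String) (st : List String × List String),
      x ∈ st.1 → x ∈ (l.foldl (faUpd prod) st).1 := by
  intro l
  induction l with
  | nil => intro st h; exact h
  | cons nt t ih =>
    intro st h
    simp only [List.foldl_cons]
    apply ih
    rw [faUpd_eq]
    split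
    · exact List.mem_append_left _ h
    · exact h

lemma faStep_mono2 {prod x : String} :
    ∀ (l : List String) (st : List String × List String),
      x ∈ st.2 → x ∈ (l.foldl (faUpd prod) st).2 := by
  intro l
  induction l with
  | nil => intro st h; exact h
  | cons nt t ih =>
    intro st h
    simp only [List.foldl_cons]
    apply ih
    rw [faUpd_eq]
    split
    · exact List.mem_append_left _ h
    · exact h

lemma faStep_mem1 {prod x : String} :
    ∀ (l : List String) (st : List String × List String),
      x ∈ (l.foldl (faUpd prod) st).1 →
        x ∈ st.1 ∨ (x ∈ l ∧ PySem.Str.isIn x prod = true) := by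
  intro l
  induction l with
  | nil => intro st h; exact Or.inl h
  | cons nt t ih =>
    intro st h
    simp only [List.foldl_cons] at h
    rcases ih _ h with h2 | ⟨hxt, hin⟩
    · rw [faUpd_eq] at h2
      split at h2
      · rename_i hcond
        rcases List.mem_append.mp h2 with h3 | h3
        · exact Or.inl h3
        · have hx : x = nt := by simpa using h3
          subst hx
          exact Or.inr ⟨List.mem_cons_self, ((Bool.and_eq_true ..).mp hcond).1⟩
      · exact Or.inl h2
    · exact Or.inr ⟨List.mem_cons_of_mem _ hxt, hin⟩

lemma faStep_mem2 {prod x : String} :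
    ∀ (l : List String) (st : List String × List String),
      x ∈ (l.foldl (faUpd prod) st).2 →
        x ∈ st.2 ∨ x ∈ (l.foldl (faUpd prod) st).1 := by
  intro l
  induction l with
  | nil => intro st h; exact Or.inl h
  | cons nt t ih =>
    intro st h
    simp only [List.foldl_cons] at h ⊢
    rcases ih _ h with h2 | h2
    · by_cases hcond : (PySem.Str.isIn nt prod && !(st.1.contains nt)) = true
      · rw [faUpd_eq, if_pos hcond] at h2
        rcases List.mem_append.mp h2 with h3 | h3
        · exact Or.inl h3
        · have hx : x = nt := by simpa using h3
          subst hx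
          refine Or.inr (faStep_mono1 _ _ ?_)
          rw [faUpd_eq, if_pos hcond]
          exact List.mem_append_right _ (by simp)
      · rw [faUpd_eq, if_neg hcond] at h2
        exact Or.inl h2
    · exact Or.inr h2

lemma faStep_new {prod x : String} :
    ∀ (l : List String) (st : List String × List String),
      x ∈ (l.foldl (faUpd prod) st).1 →
        x ∈ st.1 ∨ x ∈ (l.foldl (faUpd prod) st).2 := by
  intro l
  induction l with
  | nil => intro st h; exact Or.inl h
  | cons nt t ih =>
    intro st h
    simp only [List.foldl_cons] at h ⊢
    rcases ih _ h with h2 | h2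
    · by_cases hcond : (PySem.Str.isIn nt prod && !(st.1.contains nt)) = true
      · rw [faUpd_eq, if_pos hcond] at h2
        rcases List.mem_append.mp h2 with h3 | h3
        · exact Or.inl h3
        · have hx : x = nt := by simpa using h3
          subst hx
          refine Or.inr (faStep_mono2 _ _ ?_)
          rw [faUpd_eq, if_pos hcond]
          exact List.mem_append_right _ (by simp)
      · rw [faUpd_eq, if_neg hcond] at h2
        exact Or.inl h2
    · exact Or.inr h2

lemma faStep_complete {prod nt : String} (hin : PySem.Str.isIn nt prod = true) :
    ∀ (l : List String) (st : List String × List String),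
      nt ∈ l → nt ∈ (l.foldl (faUpd prod) st).1 := by
  intro l
  induction l with
  | nil => intro st h; cases h
  | cons b t ih =>
    intro st h
    rcases List.mem_cons.mp h with rfl | h
    · simp only [List.foldl_cons]
      apply faStep_mono1
      rw [faUpd_eq]
      split
      · exact List.mem_append_right _ (by simp)
      · rename_i hcond
        have hc : st.1.contains nt = true := by
          cases hc : st.1.contains nt
          · exact absurd (by rw [hin, hc]; rfl) hcond
          · rfl
        exact List.contains_iff_mem.mp hc
    · simp only [List.foldl_cons]
      exact ih _ h

-- body-level lemmas (fold over the production list)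
lemma faBody_mono1 {keys : List String} {x : String} :
    ∀ (P : List String) (st : List String × List String),
      x ∈ st.1 → x ∈ (P.foldl (fun st prod => keys.foldl (faUpd prod) st) st).1 := by
  intro P
  induction P with
  | nil => intro st h; exact h
  | cons p t ih =>
    intro st h
    simp only [List.foldl_cons]
    exact ih _ (faStep_mono1 _ _ h)

lemma faBody_mono2 {keys : List String} {x : String} :
    ∀ (P : List String) (st : List String × List String),
      x ∈ st.2 → x ∈ (P.foldl (fun st prod => keys.foldl (faUpd prod) st) st).2 := by
  intro P
  induction P with
  | nil => intro st h; exact h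
  | cons p t ih =>
    intro st h
    simp only [List.foldl_cons]
    exact ih _ (faStep_mono2 _ _ h)

lemma faBody_mem1 {keys : List String} {x : String} :
    ∀ (P : List String) (st : List String × List String),
      x ∈ (P.foldl (fun st prod => keys.foldl (faUpd prod) st) st).1 →
        x ∈ st.1 ∨ (x ∈ keys ∧ ∃ prod ∈ P, PySem.Str.isIn x prod = true) := by
  intro P
  induction P with
  | nil => intro st h; exact Or.inl h
  | cons p t ih =>
    intro st h
    simp only [List.foldl_cons] at h
    rcases ih _ h with h2 | ⟨hk, prod, hp, hin⟩
    · rcases faStep_mem1 _ _ h2 with h3 | ⟨hk, hin⟩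
      · exact Or.inl h3
      · exact Or.inr ⟨hk, p, List.mem_cons_self, hin⟩
    · exact Or.inr ⟨hk, prod, List.mem_cons_of_mem _ hp, hin⟩

lemma faBody_mem2 {keys : List String} {x : String} :
    ∀ (P : List String) (st : List String × List String),
      x ∈ (P.foldl (fun st prod => keys.foldl (faUpd prod) st) st).2 →
        x ∈ st.2 ∨ x ∈ (P.foldl (fun st prod => keys.foldl (faUpd prod) st) st).1 := by
  intro P
  induction P with
  | nil => intro st h; exact Or.inl h
  | cons p t ih =>
    intro st h
    simp only [List.foldl_cons] at h ⊢
    rcases ih _ h with h2 | h2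
    · rcases faStep_mem2 _ _ h2 with h3 | h3
      · exact Or.inl h3
      · exact Or.inr (faBody_mono1 _ _ h3)
    · exact Or.inr h2

lemma faBody_new {keys : List String} {x : String} :
    ∀ (P : List String) (st : List String × List String),
      x ∈ (P.foldl (fun st prod => keys.foldl (faUpd prod) st) st).1 →
        x ∈ st.1 ∨ x ∈ (P.foldl (fun st prod => keys.foldl (faUpd prod) st) st).2 := by
  intro P
  induction P with
  | nil => intro st h; exact Or.inl h
  | cons p t ih =>
    intro st h
    simp only [List.foldl_cons] at h ⊢
    rcases ih _ h with h2 | h2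
    · rcases faStep_new _ _ h2 with h3 | h3
      · exact Or.inl h3
      · exact Or.inr (faBody_mono2 _ _ h3)
    · exact Or.inr h2

lemma faBody_complete {keys : List String} {prod nt : String}
    (hk : nt ∈ keys) (hin : PySem.Str.isIn nt prod = true) :
    ∀ (P : List String) (st : List String × List String), prod ∈ P →
      nt ∈ (P.foldl (fun st prod => keys.foldl (faUpd prod) st) st).1 := by
  intro P
  induction P with
  | nil => intro st h; cases h
  | cons p t ih =>
    intro st h
    simp only [List.foldl_cons]
    rcases List.mem_cons.mp h with rfl | h
    · exact faBody_mono1 _ _ (faStep_complete hin _ _ hk)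
    · exact ih _ h

-- A's loop: growth, soundness, closure
lemma faLoop_grow {g : List (String × List String)} {keys : List String} {x : String} :
    ∀ (r q : List String), x ∈ r → x ∈ faLoop g keys r q := by
  intro r q
  induction r, q using faLoop.induct g keys with
  | case1 r =>
    intro hx
    rw [faLoop]
    simpa using hx
  | case2 r q h st ih =>
    intro hx
    rw [faLoop]
    simp only [dif_neg h]
    exact ih (faBody_mono1 _ _ hx)

lemma faLoop_sound {g : List (String × List String)} {s : String} :
    ∀ (r q : List String), (∀ x ∈ r, pvRch g s x) → (∀ x ∈ q, pvRch g s x) →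
      ∀ x ∈ faLoop g (pvKeys g) r q, pvRch g s x := by
  intro r q
  induction r, q using faLoop.induct g (pvKeys g) with
  | case1 r =>
    intro hr _ x hx
    rw [faLoop] at hx
    exact hr x (by simpa using hx)
  | case2 r q h st ih =>
    intro hr hq x hx
    rw [faLoop] at hx
    simp only [dif_neg h] at hx
    have hcur : pvRch g s (q.getLast h) := hq _ (List.getLast_mem h)
    have hst1 : ∀ y ∈ (faBody g (pvKeys g) (q.getLast h) (r, q.dropLast)).1, pvRch g s y := by
      intro y hy
      rcases faBody_mem1 _ _ hy with hy | ⟨hk, prod, hp, hin⟩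
      · exact hr y hy
      · exact pvRch.step hcur hp hk hin
    have hst2 : ∀ y ∈ (faBody g (pvKeys g) (q.getLast h) (r, q.dropLast)).2, pvRch g s y := by
      intro y hy
      rcases faBody_mem2 _ _ hy with hy | hy
      · exact hq y (List.mem_of_mem_dropLast hy)
      · exact hst1 y hy
    exact ih hst1 hst2 x hx

lemma faLoop_closed {g : List (String × List String)} :
    ∀ (r q : List String),
      (∀ c ∈ r, c ∉ q → ∀ prod ∈ pvProds g c, ∀ nt ∈ pvKeys g,
        PySem.Str.isIn nt prod = true → nt ∈ r) →
      ∀ c ∈ faLoop g (pvKeys g) r q, ∀ prod ∈ pvProds g c, ∀ nt ∈ pvKeys g,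
        PySem.Str.isIn nt prod = true → nt ∈ faLoop g (pvKeys g) r q := by
  intro r q
  induction r, q using faLoop.induct g (pvKeys g) with
  | case1 r =>
    intro hinv c hc prod hp nt hk hin
    rw [faLoop] at hc ⊢
    simp only [dite_eq_ite, if_pos rfl] at hc ⊢
    exact hinv c hc (by simp) prod hp nt hk hin
  | case2 r q h st ih =>
    intro hinv
    rw [faLoop]
    simp only [dif_neg h]
    apply ih
    intro c hc hcq prod hp nt hk hin
    rcases faBody_new _ _ hc with hcr | hcq2
    swap
    · exact absurd hcq2 hcq
    by_cases hcur : c = q.getLast h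
    · subst hcur
      exact faBody_complete hk hin _ _ hp
    by_cases hcq0 : c ∈ q
    · exfalso
      have hmem : c ∈ q.dropLast ++ [q.getLast h] := by
        rw [List.dropLast_append_getLast h]; exact hcq0
      rcases List.mem_append.mp hmem with hdl | hl
      · exact hcq (faBody_mono2 _ _ hdl)
      · exact hcur (by simpa using hl)
    · exact faBody_mono1 _ _ (hinv c hcr hcq0 prod hp nt hk hin)

-- B-side fold lemmas
lemma fbProd_mono {r : List String} {prod x : String} :
    ∀ (l acc : List String), x ∈ acc → x ∈ l.foldl (fbUpd r prod) acc := by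
  intro l
  induction l with
  | nil => intro acc h; exact h
  | cons nt t ih =>
    intro acc h
    simp only [List.foldl_cons]
    apply ih
    rw [fbUpd_eq]
    split
    · exact (PySem.Set.mem_add _ _ _).mpr (Or.inl h)
    · exact h

lemma fbProd_complete {r : List String} {prod nt : String}
    (hin : PySem.Str.isIn nt prod = true) (hnr : nt ∉ r) :
    ∀ (l acc : List String), nt ∈ l → nt ∈ l.foldl (fbUpd r prod) acc := by
  intro l
  induction l with
  | nil => intro acc h; cases h
  | cons b t ih =>
    intro acc h
    rcases List.mem_cons.mp h with rfl | h
    · simp only [List.foldl_cons]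
      apply fbProd_mono
      rw [fbUpd_eq, if_pos (by rw [hin, pv_contains_false_of_not_mem hnr]; rfl)]
      exact (PySem.Set.mem_add _ _ _).mpr (Or.inr rfl)
    · simp only [List.foldl_cons]
      exact ih _ h

lemma fbProdsFold_mono {keys r : List String} {x : String} :
    ∀ (P acc : List String), x ∈ acc → x ∈ P.foldl (fbProd keys r) acc := by
  intro P
  induction P with
  | nil => intro acc h; exact h
  | cons p t ih =>
    intro acc h
    simp only [List.foldl_cons]
    exact ih _ (fbProd_mono _ _ h)

lemma fbProdsFold_complete {keys r : List String} {prod nt : String}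
    (hk : nt ∈ keys) (hin : PySem.Str.isIn nt prod = true) (hnr : nt ∉ r) :
    ∀ (P acc : List String), prod ∈ P → nt ∈ P.foldl (fbProd keys r) acc := by
  intro P
  induction P with
  | nil => intro acc h; cases h
  | cons p t ih =>
    intro acc h
    simp only [List.foldl_cons]
    rcases List.mem_cons.mp h with rfl | h
    · exact fbProdsFold_mono _ _ (fbProd_complete hin hnr _ _ hk)
    · exact ih _ h

lemma fbNew_complete {g : List (String × List String)} {keys r : List String}
    {c prod nt : String} (hc : c ∈ r) (hp : prod ∈ pvProds g c) (hk : nt ∈ keys)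
    (hin : PySem.Str.isIn nt prod = true) (hnr : nt ∉ r) : nt ∈ fbNew g keys r := by
  unfold fbNew
  have main : ∀ (L acc : List String), c ∈ L →
      nt ∈ L.foldl (fun acc c => (pvProds g c).foldl (fbProd keys r) acc) acc := by
    intro L
    induction L with
    | nil => intro acc h; cases h
    | cons b t ih =>
      intro acc h
      simp only [List.foldl_cons]
      rcases List.mem_cons.mp h with rfl | h
      · have hmono : ∀ (T acc : List String), nt ∈ acc →
            nt ∈ T.foldl (fun acc c => (pvProds g c).foldl (fbProd keys r) acc) acc := by
          intro T
          induction T with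
          | nil => intro acc h2; exact h2
          | cons b2 t2 ih2 =>
            intro acc h2
            simp only [List.foldl_cons]
            exact ih2 _ (fbProdsFold_mono _ _ h2)
        exact hmono _ _ (fbProdsFold_complete hk hin hnr _ _ hp)
      · exact ih _ h
  exact main r [] hc

-- B's loop: growth, soundness, closure
lemma fbLoop_grow {g : List (String × List String)} {keys : List String} {x : String} :
    ∀ (r : List String), x ∈ r → x ∈ fbLoop g keys r := by
  intro r
  induction r using fbLoop.induct g keys with
  | case1 r nw h =>
    intro hx
    have h' : fbNew g keys r = [] := h
    rw [fbLoop, dif_pos h']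
    exact hx
  | case2 r nw h ih =>
    intro hx
    have h' : ¬ fbNew g keys r = [] := h
    rw [fbLoop, dif_neg h']
    exact ih ((PySem.Set.mem_union _ _ _).mpr (Or.inl hx))

lemma fbLoop_sound {g : List (String × List String)} {s : String} :
    ∀ (r : List String), (∀ x ∈ r, pvRch g s x) →
      ∀ x ∈ fbLoop g (pvKeys g) r, pvRch g s x := by
  intro r
  induction r using fbLoop.induct g (pvKeys g) with
  | case1 r nw h =>
    intro hr x hx
    have h' : fbNew g (pvKeys g) r = [] := h
    rw [fbLoop, dif_pos h'] at hx
    exact hr x hx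
  | case2 r nw h ih =>
    intro hr x hx
    have h' : ¬ fbNew g (pvKeys g) r = [] := h
    rw [fbLoop, dif_neg h'] at hx
    refine ih ?_ x hx
    intro y hy
    rcases (PySem.Set.mem_union _ _ _).mp hy with hy | hy
    · exact hr y hy
    · obtain ⟨hk, -, c, hcr, prod, hp, hin⟩ := fbNew_sound hy
      exact pvRch.step (hr c hcr) hp hk hin

lemma fbLoop_closed {g : List (String × List String)} :
    ∀ (r : List String), ∀ c ∈ fbLoop g (pvKeys g) r, ∀ prod ∈ pvProds g c,
      ∀ nt ∈ pvKeys g, PySem.Str.isIn nt prod = true → nt ∈ fbLoop g (pvKeys g) r := by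
  intro r
  induction r using fbLoop.induct g (pvKeys g) with
  | case1 r nw h =>
    intro c hc prod hp nt hk hin
    have h' : fbNew g (pvKeys g) r = [] := h
    rw [fbLoop, dif_pos h'] at hc ⊢
    by_cases hnr : nt ∈ r
    · exact hnr
    · exact absurd (fbNew_complete hc hp hk hin hnr) (by rw [h']; exact List.not_mem_nil)
  | case2 r nw h ih =>
    have h' : ¬ fbNew g (pvKeys g) r = [] := h
    rw [fbLoop, dif_neg h']
    exact ih

-- membership characterisations: both loops compute exactly pvRch
lemma memA_iff (g : List (String × List String)) (s x : String) :
    x ∈ faLoop g (pvKeys g) [s] [s] ↔ pvRch g s x := by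
  constructor
  · exact fun hx => faLoop_sound [s] [s]
      (by intro y hy; rw [List.mem_singleton] at hy; subst hy; exact pvRch.base)
      (by intro y hy; rw [List.mem_singleton] at hy; subst hy; exact pvRch.base) x hx
  · intro hR
    induction hR with
    | base => exact faLoop_grow _ _ (by simp)
    | step hc hp hk hin ih =>
      exact faLoop_closed [s] [s]
        (by
          intro c hc2 hcq
          rw [List.mem_singleton] at hc2
          subst hc2
          simp at hcq) _ ih _ hp _ hk hin

lemma memB_iff (g : List (String × List String)) (s x : String) :
    x ∈ fbLoop g (pvKeys g) [s] ↔ pvRch g s x := by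
  constructor
  · exact fun hx => fbLoop_sound [s]
      (by intro y hy; rw [List.mem_singleton] at hy; subst hy; exact pvRch.base) x hx
  · intro hR
    induction hR with
    | base => exact fbLoop_grow _ (by simp)
    | step hc hp hk hin ih =>
      exact fbLoop_closed [s] _ ih _ hp _ hk hin

lemma pv_diff_congr {s t t' : List String} (h : ∀ x, x ∈ t ↔ x ∈ t') :
    PySem.Set.diff s t = PySem.Set.diff s t' := by
  show s.filter (fun x => !(t.contains x)) = s.filter (fun x => !(t'.contains x))
  apply List.filter_congr
  intro x _
  cases hc : t'.contains x
  · cases hc2 : t.contains x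
    · rfl
    · exact absurd ((h x).mp (List.contains_iff_mem.mp hc2)) (pv_not_mem_of_contains_false hc)
  · cases hc2 : t.contains x
    · exact absurd ((h x).mpr (List.contains_iff_mem.mp hc)) (pv_not_mem_of_contains_false hc2)
    · rfl

-- ===== VERDICT (by name: the statement is the Claim_ definition above) =====
theorem find_unreachable_spec : Claim_equal_find_unreachable := by
  unfold Claim_equal_find_unreachable
  intro g s _
  unfold Spec_find_unreachable find_unreachable find_unreachable_alt
  cases hs : (pvKeys g).contains s
  · simp only [Bool.not_false, if_pos]
  · simp only [Bool.not_true, Bool.false_eq_true, if_false]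
    have hAB : ∀ x, x ∈ faLoop g (pvKeys g) [s] [s] ↔ x ∈ fbLoop g (pvKeys g) [s] :=
      fun x => (memA_iff g s x).trans (memB_iff g s x).symm
    apply pv_diff_congr
    intro x
    cases hS : (pvKeys g).contains "S'"
    · simp only [Bool.false_eq_true, if_false]
      exact hAB x
    · simp only [if_true]
      rw [PySem.Set.mem_add, PySem.Set.mem_add, hAB x]
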